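-- pv_equiv track=rewrite | github.com/nihammer/text-to-audio | src/tts_engine_piper.py | _is_japanese_romaji
-- ===== SOURCE A (Python) =====
-- _JA_DIGRAPHS = frozenset({
--     "sh", "ch", "ts", "ky", "gy", "hy", "by", "py", "my", "ny", "ry",
-- })
--
-- def _is_japanese_romaji(word: str) -> bool:
--     """Return True if *word* looks like Hepburn-romanised Japanese.
--
--     Heuristic: Japanese romaji has no non-Japanese consonant clusters.
--     If we find a pair of adjacent consonants that isn't a known Japanese digraph
--     (sh, ch, ts, ky, …), the word is classified as English.
--
--     Examples:
--         Takagi  → True   (only CV syllables)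
--         Hiroshi → True   (contains "sh" digraph)
--         Sano    → True   (only CV syllables)
--         Thor    → False  ("th" is not a Japanese digraph)
--         Steve   → False  ("st" consonant cluster)
--         Arthur  → False  ("th", "rt" clusters)
--     """
--     w = word.lower()
--     for i, c in enumerate(w):
--         if c in "aeioun":       # vowels and syllabic-n: fine
--             continue
--         nxt = w[i + 1] if i + 1 < len(w) else ""
--         if nxt and nxt not in "aeiou":
--             # Two consecutive consonants: must be a known Japanese digraph
--             if w[i:i + 2] not in _JA_DIGRAPHS:
--                 return False
--     return True
-- ===== SOURCE B (Python) =====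
-- _JA_DIGRAPHS = frozenset({
--     "sh", "ch", "ts", "ky", "gy", "hy", "by", "py", "my", "ny", "ry",
-- })
--
-- def _is_japanese_romaji(word: str) -> bool:
--     """Staged set-based check: one pass collects the positions that could
--     START a bad consonant cluster, another pass the positions that could END
--     one; their intersection is exactly the set of adjacent-consonant slice
--     starts, and every such slice must be a known Japanese digraph."""
--     w = word.lower()
--     starts = {i for i, ch in enumerate(w) if ch not in "aeioun"}
--     ends = {j - 1 for j, ch in enumerate(w) if ch not in "aeiou"}
--     return all(w[i:i + 2] in _JA_DIGRAPHS for i in starts & ends)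
-- ===== Notes on version B (the rewrite author's own statement) =====
-- stated objective: alternative
-- what changed: Instead of A's single indexed scan with a conditional lookahead and early return, B builds two index sets in separate passes (positions that could start a bad cluster, positions that could end one), intersects them, and checks only the surviving two-character slices against the digraph set.
import Mathlib
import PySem

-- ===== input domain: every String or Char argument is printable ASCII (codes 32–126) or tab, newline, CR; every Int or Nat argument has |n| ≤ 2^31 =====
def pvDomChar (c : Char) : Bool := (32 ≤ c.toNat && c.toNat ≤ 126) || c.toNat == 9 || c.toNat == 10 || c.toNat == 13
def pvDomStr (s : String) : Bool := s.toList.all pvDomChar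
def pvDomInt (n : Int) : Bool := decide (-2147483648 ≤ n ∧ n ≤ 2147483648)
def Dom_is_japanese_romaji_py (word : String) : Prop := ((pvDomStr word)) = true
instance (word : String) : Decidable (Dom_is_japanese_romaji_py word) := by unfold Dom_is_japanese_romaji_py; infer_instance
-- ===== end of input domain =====

-- B replaces A's single indexed scan with lookahead and early return by staged passes:
-- it builds two index sets (possible cluster starts, possible cluster ends), intersects
-- them, and checks only the surviving slices against the digraph set; objective: alternative.

-- the frozenset _JA_DIGRAPHS, as the list of its two-character members
def jaDigraphs : List (List Char) :=
  [['s','h'], ['c','h'], ['t','s'], ['k','y'], ['g','y'], ['h','y'],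
   ['b','y'], ['p','y'], ['m','y'], ['n','y'], ['r','y']]

-- ===== PORT A =====
-- the loop "for i, c in enumerate(w): …" with early return False.
-- "w[i+1] if i+1 < len(w) else ''" is ported as pyGet? w (i+1) (some = the char,
-- none = the empty string ""); "if nxt and nxt not in 'aeiou'" then tests the option.
def jaLoopA (w : List Char) : List (Int × Char) → Bool
  | [] => true
  | (i, c) :: rest =>
    if ['a','e','i','o','u','n'].contains c then jaLoopA w rest
    else
      match PySem.List.pyGet? w (i + 1) with
      | none => jaLoopA w rest
      | some nxt =>
        if ['a','e','i','o','u'].contains nxt then jaLoopA w rest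
        else if jaDigraphs.contains (PySem.List.slice w (some i) (some (i + 2))) then
          jaLoopA w rest
        else false

def is_japanese_romaji_py (word : String) : Bool :=
  let w := (PySem.Str.lower word).toList
  jaLoopA w (PySem.List.enumerate w 0)

-- ===== PORT B =====
-- the two set comprehensions over enumerate(w), their intersection, and all(…);
-- the sets are only intersected and consumed by all(), so Python's set-iteration
-- order cannot affect the result.
def is_japanese_romaji_py_alt (word : String) : Bool :=
  let w := (PySem.Str.lower word).toList
  let starts : PySem.Set Int :=
    PySem.Set.ofList (((PySem.List.enumerate w 0).filter
      (fun p => !(['a','e','i','o','u','n'].contains p.2))).map Prod.fst)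
  let ends : PySem.Set Int :=
    PySem.Set.ofList (((PySem.List.enumerate w 0).filter
      (fun p => !(['a','e','i','o','u'].contains p.2))).map (fun p => p.1 - 1))
  (PySem.Set.inter starts ends).all
    (fun i => jaDigraphs.contains (PySem.List.slice w (some i) (some (i + 2))))

-- ===== PRECONDITION & SPEC =====
def Spec_is_japanese_romaji_py (word : String) (out : Bool) : Prop := out = is_japanese_romaji_py_alt word
instance (word : String) (out : Bool) : Decidable (Spec_is_japanese_romaji_py word out) := by unfold Spec_is_japanese_romaji_py; infer_instance

-- ===== CLAIM (what is proved, stated in full; the proofs are below) =====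
def Claim_equal_is_japanese_romaji_py : Prop := ∀ (word : String), Dom_is_japanese_romaji_py word → Spec_is_japanese_romaji_py word (is_japanese_romaji_py word)

-- ===== LEMMAS AND PROOFS =====

-- the common pairwise reading both ports are reduced to
def jaPairOk (p : Char × Char) : Bool :=
  ['a','e','i','o','u','n'].contains p.1 || ['a','e','i','o','u'].contains p.2 ||
    jaDigraphs.contains [p.1, p.2]

-- B's body, factored on the lowered character list
def is_japanese_romaji_py_alt_core (w : List Char) : Bool :=
  (PySem.Set.inter
     (PySem.Set.ofList (((PySem.List.enumerate w 0).filter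
        (fun p => !(['a','e','i','o','u','n'].contains p.2))).map Prod.fst))
     (PySem.Set.ofList (((PySem.List.enumerate w 0).filter
        (fun p => !(['a','e','i','o','u'].contains p.2))).map (fun p => p.1 - 1)))).all
    (fun i => jaDigraphs.contains (PySem.List.slice w (some i) (some (i + 2))))

theorem jaSlice_two (w : List Char) (k : Nat) (h : k + 1 < w.length) :
    PySem.List.slice w (some (k : Int)) (some ((k : Int) + 2)) = [w[k], w[k + 1]] := by
  have h2 : PySem.List.slice w (some (k : Int)) (some ((k : Int) + ((2 : Nat) : Int))) =
      (w.drop k).take 2 := PySem.List.slice_natCast_add w k 2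
  have hd : w.drop k = w[k] :: w.drop (k + 1) := List.drop_eq_getElem_cons (by omega)
  have hd2 : w.drop (k + 1) = w[k + 1] :: w.drop (k + 2) := List.drop_eq_getElem_cons (by omega)
  have ht : (w.drop k).take 2 = [w[k], w[k + 1]] := by rw [hd, hd2]; rfl
  rw [ht] at h2
  exact_mod_cast h2

theorem jaLoopA_eq_all (suf : List Char) : ∀ (pre : List Char),
    jaLoopA (pre ++ suf) (PySem.List.enumerate suf (pre.length : Int))
      = (suf.zip (suf.drop 1)).all jaPairOk := by
  induction suf with
  | nil => intro pre; simp [jaLoopA, PySem.List.enumerate]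
  | cons c rest ih =>
    intro pre
    rw [PySem.List.enumerate_cons]
    have hrec : jaLoopA (pre ++ c :: rest) (PySem.List.enumerate rest ((pre.length : Int) + 1))
        = (rest.zip (rest.drop 1)).all jaPairOk := by
      have := ih (pre ++ [c])
      simpa [List.length_append] using this
    cases rest with
    | nil =>
      have hget : PySem.List.pyGet? (pre ++ [c]) ((pre.length : Int) + 1) = none := by
        simpa using PySem.List.pyGet?_append_right pre [c] 1
      simp [jaLoopA, hget, PySem.List.enumerate]
    | cons b rest' =>
      have hget : PySem.List.pyGet? (pre ++ c :: b :: rest') ((pre.length : Int) + 1) = some b := by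
        simpa using PySem.List.pyGet?_append_right pre (c :: b :: rest') 1
      have hslice : PySem.List.slice (pre ++ c :: b :: rest') (some (pre.length : Int))
          (some ((pre.length : Int) + 2)) = [c, b] := by
        have := PySem.List.slice_natCast_add (pre ++ c :: b :: rest') pre.length 2
        simpa [List.drop_append_of_le_length, List.take] using this
      simp only [jaLoopA, hget, hslice, hrec]
      by_cases hc : c = 'a' ∨ c = 'e' ∨ c = 'i' ∨ c = 'o' ∨ c = 'u' ∨ c = 'n' <;>
        by_cases hb : b = 'a' ∨ b = 'e' ∨ b = 'i' ∨ b = 'o' ∨ b = 'u' <;>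
          by_cases hd : [c, b] ∈ jaDigraphs <;>
            simp [jaPairOk, hc, hb, hd]

-- the zip-all reading, as a quantifier over positions
theorem jaZipAll_iff (w : List Char) :
    (w.zip (w.drop 1)).all jaPairOk = true ↔
      ∀ (k : Nat) (h : k + 1 < w.length), jaPairOk (w[k], w[k + 1]) = true := by
  rw [List.all_eq_true]
  constructor
  · intro hall k h
    have hk : k < (w.zip (w.drop 1)).length := by
      simp [List.length_zip]; omega
    have := hall (w.zip (w.drop 1))[k] (List.getElem_mem hk)
    simpa [List.getElem_zip] using this
  · intro h p hp
    obtain ⟨k, hk, he⟩ := List.getElem_of_mem hp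
    have hlen : k + 1 < w.length := by
      simp [List.length_zip] at hk; omega
    rw [← he]
    simpa [List.getElem_zip] using h k hlen

-- B's set-intersection form equals the zip-all reading
theorem jaAlt_eq_zipAll (w : List Char) :
    is_japanese_romaji_py_alt_core w = (w.zip (w.drop 1)).all jaPairOk := by
  rw [Bool.eq_iff_iff, jaZipAll_iff]
  unfold is_japanese_romaji_py_alt_core
  rw [List.all_eq_true]
  constructor
  · intro hall k hk
    simp only [jaPairOk, Bool.or_eq_true]
    by_cases h1 : (['a','e','i','o','u','n'].contains w[k]) = true
    · exact Or.inl (Or.inl h1)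
    · by_cases h2 : (['a','e','i','o','u'].contains w[k + 1]) = true
      · exact Or.inl (Or.inr h2)
      · refine Or.inr ?_
        have hmem : (k : Int) ∈ PySem.Set.inter
            (PySem.Set.ofList (((PySem.List.enumerate w 0).filter
               (fun p => !(['a','e','i','o','u','n'].contains p.2))).map Prod.fst))
            (PySem.Set.ofList (((PySem.List.enumerate w 0).filter
               (fun p => !(['a','e','i','o','u'].contains p.2))).map (fun p => p.1 - 1))) := by
          refine (PySem.Set.mem_inter _ _ _).mpr
            ⟨(PySem.Set.mem_ofList _ _).mpr ?_, (PySem.Set.mem_ofList _ _).mpr ?_⟩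
          · refine List.mem_map.mpr ⟨((k : Int), w[k]),
              List.mem_filter.mpr ⟨?_, by simpa using h1⟩, rfl⟩
            exact (PySem.List.mem_enumerate_iff _ _ _).mpr ⟨k, by omega, by simp⟩
          · refine List.mem_map.mpr ⟨(((k + 1 : Nat) : Int), w[k + 1]),
              List.mem_filter.mpr ⟨?_, by simpa using h2⟩, by push_cast; ring⟩
            exact (PySem.List.mem_enumerate_iff _ _ _).mpr ⟨k + 1, by omega, by simp⟩
        have hv := hall _ hmem
        rw [jaSlice_two w k hk] at hv
        exact hv
  · intro h i hi
    obtain ⟨hi1, hi2⟩ := (PySem.Set.mem_inter _ _ _).mp hi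
    obtain ⟨p1, hp1, hp1e⟩ := List.mem_map.mp ((PySem.Set.mem_ofList _ _).mp hi1)
    obtain ⟨p2, hp2, hp2e⟩ := List.mem_map.mp ((PySem.Set.mem_ofList _ _).mp hi2)
    obtain ⟨hp1m, hc1⟩ := List.mem_filter.mp hp1
    obtain ⟨hp2m, hc2⟩ := List.mem_filter.mp hp2
    obtain ⟨k1, hk1, he1⟩ := (PySem.List.mem_enumerate_iff _ _ _).mp hp1m
    obtain ⟨k2, hk2, he2⟩ := (PySem.List.mem_enumerate_iff _ _ _).mp hp2m
    subst he1 he2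
    have hi1' : i = (k1 : Int) := by simpa using hp1e.symm
    have hi2' : i = (k2 : Int) - 1 := by simpa using hp2e.symm
    have hk2eq : k2 = k1 + 1 := by omega
    subst hk2eq
    have hc1' : (['a','e','i','o','u','n'].contains w[k1]) = false := by simpa using hc1
    have hc2' : (['a','e','i','o','u'].contains w[k1 + 1]) = false := by simpa using hc2
    have hv := h k1 hk2
    simp only [jaPairOk, Bool.or_eq_true] at hv
    rw [hi1', jaSlice_two w k1 hk2]
    rcases hv with (h1 | h2) | h3
    · rw [h1] at hc1'; cases hc1'
    · rw [h2] at hc2'; cases hc2'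
    · exact h3

-- ===== VERDICT (by name: the statement is the Claim_ definition above) =====
theorem is_japanese_romaji_py_spec : Claim_equal_is_japanese_romaji_py := by
  intro word _
  unfold Spec_is_japanese_romaji_py is_japanese_romaji_py
  rw [show is_japanese_romaji_py_alt word
        = is_japanese_romaji_py_alt_core ((PySem.Str.lower word).toList) from rfl,
      jaAlt_eq_zipAll]
  simpa using jaLoopA_eq_all ((PySem.Str.lower word).toList) []
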